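-- pv_equiv track=rewrite | github.com/G36maid/ctf-arsenal | csc2025/bank/generate_national_id.py | generate_national_id
-- ===== SOURCE A (Python) =====
-- LETTER_CHECKSUMS = [
--     1,
--     0,
--     9,
--     8,
--     7,
--     6,
--     5,
--     4,
--     9,
--     3,
--     2,
--     2,
--     1,
--     0,
--     8,
--     9,
--     8,
--     7,
--     6,
--     5,
--     4,
--     3,
--     1,
--     3,
--     2,
--     0,
-- ]
--
-- def generate_national_id(letter_idx, sex, counter):
--     """Generate a valid Taiwan National ID with checksum"""
--     letter = chr(ord("A") + letter_idx)
--     checksum = LETTER_CHECKSUMS[letter_idx]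
--     sex_digit = sex
--     checksum += 8 * sex_digit
--
--     digits = []
--     temp = counter
--     for i in range(7):
--         digit = temp % 10
--         temp //= 10
--         digits.append(digit)
--
--     digits.reverse()
--
--     for i, digit in enumerate(digits):
--         checksum += digit * (7 - i)
--
--     check_digit = (10 - checksum % 10) % 10
--
--     national_id = f"{letter}{sex_digit}{''.join(map(str, digits))}{check_digit}"
--     return national_id
-- ===== SOURCE B (Python) =====
-- LETTER_CHECKSUMS = [
--     1, 0, 9, 8, 7, 6, 5, 4, 9, 3, 2, 2, 1,
--     0, 8, 9, 8, 7, 6, 5, 4, 3, 1, 3, 2, 0,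
-- ]
--
-- def generate_national_id(letter_idx, sex, counter):
--     """Generate a valid Taiwan National ID with checksum"""
--     digit_str = f"{counter % 10_000_000:07d}"
--     checksum = LETTER_CHECKSUMS[letter_idx] + 8 * sex + sum(
--         (ord(d) - 48) * w for d, w in zip(digit_str, (7, 6, 5, 4, 3, 2, 1)))
--     check_digit = (10 - checksum % 10) % 10
--     return f"{chr(ord('A') + letter_idx)}{sex}{digit_str}{check_digit}"
-- ===== Notes on version B (the rewrite author's own statement) =====
-- stated objective: simpler
-- what changed: B replaces A's 7-step mod/div digit-extraction loop, list reversal and enumerate-indexed checksum loop by the closed-form zero-padded string of counter % 10_000_000 and a single weighted sum over its characters.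
import Mathlib
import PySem

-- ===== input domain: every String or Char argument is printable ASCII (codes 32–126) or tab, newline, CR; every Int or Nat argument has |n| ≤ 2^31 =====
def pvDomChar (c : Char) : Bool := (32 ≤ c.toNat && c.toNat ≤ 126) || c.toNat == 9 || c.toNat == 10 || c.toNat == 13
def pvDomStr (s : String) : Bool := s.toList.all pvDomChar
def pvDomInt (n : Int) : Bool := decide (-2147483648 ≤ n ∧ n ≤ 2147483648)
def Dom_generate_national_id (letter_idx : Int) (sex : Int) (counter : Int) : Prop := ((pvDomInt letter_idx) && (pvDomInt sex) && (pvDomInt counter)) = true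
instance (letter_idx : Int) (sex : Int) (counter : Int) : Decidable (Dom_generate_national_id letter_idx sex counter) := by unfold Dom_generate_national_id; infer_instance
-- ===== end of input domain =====

-- B replaces A's digit-extraction loop + reversal + enumerate loop by the closed-form
-- zero-padded string of counter % 10^7 and a single weighted pass over its characters (objective: simpler).

def LETTER_CHECKSUMS : List Int :=
  [1, 0, 9, 8, 7, 6, 5, 4, 9, 3, 2, 2, 1, 0, 8, 9, 8, 7, 6, 5, 4, 3, 1, 3, 2, 0]

-- ===== PORT A =====
def generate_national_id (letter_idx : Int) (sex : Int) (counter : Int) : String :=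
  -- chr(ord("A") + letter_idx): exact for the code points Pre_ admits (39..90)
  let letter := Char.ofNat (65 + letter_idx).toNat
  let checksum := PySem.List.pyGetD LETTER_CHECKSUMS letter_idx 0
  let sex_digit := sex
  let checksum := checksum + 8 * sex_digit
  -- for i in range(7): digit = temp % 10; temp //= 10; digits.append(digit)
  let st := (List.range 7).foldl
    (fun (st : List Int × Int) _ =>
      (st.1 ++ [PySem.Int.mod st.2 10], PySem.Int.floordiv st.2 10)) ([], counter)
  let digits := st.1.reverse
  let checksum := (PySem.List.enumerate digits 0).foldl
    (fun c p => c + p.2 * (7 - p.1)) checksum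
  let check_digit := PySem.Int.mod (10 - PySem.Int.mod checksum 10) 10
  PySem.Str.join "" [String.ofList [letter], PySem.Int.toStr sex_digit,
    PySem.Str.join "" (digits.map PySem.Int.toStr), PySem.Int.toStr check_digit]

-- ===== PORT B =====
def generate_national_id_alt (letter_idx : Int) (sex : Int) (counter : Int) : String :=
  -- f"{counter % 10_000_000:07d}": the modulus is non-negative, so 07d-padding is str(..).zfill(7)
  let digit_str := PySem.Str.zfill (PySem.Int.toStr (PySem.Int.mod counter 10000000)) 7
  -- sum((ord(d) - 48) * w for d, w in zip(digit_str, (7, 6, 5, 4, 3, 2, 1)))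
  let checksum := PySem.List.pyGetD LETTER_CHECKSUMS letter_idx 0 + 8 * sex +
    (digit_str.toList.zip [7, 6, 5, 4, 3, 2, 1]).foldl
      (fun acc p => acc + ((p.1.toNat : Int) - 48) * p.2) 0
  let check_digit := PySem.Int.mod (10 - PySem.Int.mod checksum 10) 10
  PySem.Str.join "" [String.ofList [Char.ofNat (65 + letter_idx).toNat],
    PySem.Int.toStr sex, digit_str, PySem.Int.toStr check_digit]

-- ===== PRECONDITION & SPEC =====
-- Pre_ excludes exactly the inputs where Python A raises: letter_idx outside the index
-- range of the 26-entry LETTER_CHECKSUMS table (IndexError; Python negative indexing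
-- makes -26..-1 valid).
def Pre_generate_national_id (letter_idx : Int) (sex : Int) (counter : Int) : Prop :=
  -26 ≤ letter_idx ∧ letter_idx < 26
instance (letter_idx : Int) (sex : Int) (counter : Int) : Decidable (Pre_generate_national_id letter_idx sex counter) := by unfold Pre_generate_national_id; infer_instance

def pvWitness_generate_national_id : Int × Int × Int := (7, 1, 1234567)

def Spec_generate_national_id (letter_idx : Int) (sex : Int) (counter : Int) (out : String) : Prop := out = generate_national_id_alt letter_idx sex counter
instance (letter_idx : Int) (sex : Int) (counter : Int) (out : String) : Decidable (Spec_generate_national_id letter_idx sex counter out) := by unfold Spec_generate_national_id; infer_instance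

-- ===== CLAIM (what is proved, stated in full; the proofs are below) =====
def Claim_equal_generate_national_id : Prop := ∀ (letter_idx : Int) (sex : Int) (counter : Int), Dom_generate_national_id letter_idx sex counter → Pre_generate_national_id letter_idx sex counter → Spec_generate_national_id letter_idx sex counter (generate_national_id letter_idx sex counter)

-- ===== LEMMAS AND PROOFS =====

theorem tdc_acc : ∀ (f n : Nat) (acc : List Char),
    Nat.toDigitsCore 10 f n acc = Nat.toDigitsCore 10 f n [] ++ acc := by
  intro f
  induction f with
  | zero => intro n acc; simp [Nat.toDigitsCore]
  | succ f ih =>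
    intro n acc
    simp only [Nat.toDigitsCore]
    by_cases h : n / 10 = 0
    · simp [h]
    · simp only [h]
      rw [ih (n/10) _, ih (n/10) [_]]
      simp

theorem tdc_fuel : ∀ (n f₁ f₂ : Nat), n < f₁ → n < f₂ →
    Nat.toDigitsCore 10 f₁ n [] = Nat.toDigitsCore 10 f₂ n [] := by
  intro n
  induction n using Nat.strong_induction_on with
  | _ n ih =>
    intro f₁ f₂ h1 h2
    match f₁, f₂ with
    | f₁+1, f₂+1 =>
      simp only [Nat.toDigitsCore]
      by_cases h : n / 10 = 0
      · simp [h]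
      · simp only [h]
        rw [tdc_acc, tdc_acc f₂]
        rw [ih (n/10) (by omega) f₁ f₂ (by omega) (by omega)]

theorem td_lt {n : Nat} (h : n < 10) : Nat.toDigits 10 n = [Nat.digitChar n] := by
  simp [Nat.toDigits, Nat.toDigitsCore, Nat.div_eq_of_lt h, Nat.mod_eq_of_lt h]

theorem td_step {n : Nat} (h : 10 ≤ n) :
    Nat.toDigits 10 n = Nat.toDigits 10 (n / 10) ++ [Nat.digitChar (n % 10)] := by
  have hd : n / 10 ≠ 0 := by omega
  show Nat.toDigitsCore 10 (n+1) n [] = _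
  simp only [Nat.toDigitsCore, hd]
  rw [tdc_acc]
  rw [tdc_fuel (n/10) n (n/10+1) (by omega) (by omega)]
  rfl

def bigdigits : Nat → Nat → List Char
  | 0, _ => []
  | k+1, n => bigdigits k (n / 10) ++ [Nat.digitChar (n % 10)]

theorem bigdigits_zero : ∀ k, bigdigits k 0 = List.replicate k '0' := by
  intro k
  induction k with
  | zero => rfl
  | succ k ih =>
    simp only [bigdigits, Nat.zero_div, Nat.zero_mod, ih, List.replicate_succ']
    rfl

theorem td_head : ∀ n : Nat, ∃ d : Nat, d < 10 ∧ ∃ rest, Nat.toDigits 10 n = Nat.digitChar d :: rest := by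
  intro n
  induction n using Nat.strong_induction_on with
  | _ n ih =>
    by_cases h : n < 10
    · exact ⟨n, h, [], by rw [td_lt h]⟩
    · obtain ⟨d, hd, rest, hr⟩ := ih (n/10) (by omega)
      exact ⟨d, hd, rest ++ [Nat.digitChar (n % 10)], by rw [td_step (by omega), hr]; rfl⟩

theorem td_pad : ∀ k n : Nat, 1 ≤ k → n < 10 ^ k →
    List.replicate (k - (Nat.toDigits 10 n).length) '0' ++ Nat.toDigits 10 n = bigdigits k n := by
  intro k
  induction k with
  | zero => omega
  | succ k ih =>
    intro n _ hn
    by_cases h : n < 10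
    · rw [td_lt h]
      have h0 : n / 10 = 0 := by omega
      simp only [bigdigits, h0, bigdigits_zero, Nat.mod_eq_of_lt h]
      simp
    · have hk : 1 ≤ k := by
        by_contra hc
        have : k = 0 := by omega
        subst this; simp at hn; omega
      rw [td_step (by omega)]
      simp only [bigdigits]
      rw [← ih (n/10) hk (by rw [pow_succ] at hn; omega)]
      have hlen : 1 ≤ (Nat.toDigits 10 (n/10)).length := by
        obtain ⟨d, _, rest, hr⟩ := td_head (n/10); simp [hr]
      rw [← List.append_assoc]
      have hl : (Nat.toDigits 10 (n / 10) ++ [Nat.digitChar (n % 10)]).length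
          = (Nat.toDigits 10 (n / 10)).length + 1 := by simp
      rw [hl]
      have he : k + 1 - ((Nat.toDigits 10 (n/10)).length + 1)
          = k - (Nat.toDigits 10 (n/10)).length := by omega
      rw [he]

theorem digitChar_toNat {d : Nat} (h : d < 10) : (Nat.digitChar d).toNat = 48 + d := by
  interval_cases d <;> decide

theorem zfill_td {n : Nat} (h : n < 10 ^ 7) :
    PySem.Chars.zfill (Nat.toDigits 10 n) 7 = bigdigits 7 n := by
  obtain ⟨d, hd, rest, hr⟩ := td_head n
  have hlen : (Nat.toDigits 10 n).length ≤ 7 := Nat.toDigits_length 10 n 7 (by norm_num) h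
  rw [← td_pad 7 n (by norm_num) h]
  by_cases hge : (7:Int) ≤ ((Nat.toDigits 10 n).length : Int)
  · have h7 : (Nat.toDigits 10 n).length = 7 := by omega
    rw [PySem.Chars.zfill.eq_def, if_pos hge, h7]
    simp
  · rw [PySem.Chars.zfill.eq_def, if_neg hge, hr]
    have hsign : ¬ (Nat.digitChar d = '+' ∨ Nat.digitChar d = '-') := by
      interval_cases d <;> decide
    simp only [hsign]
    rw [← hr]
    congr 1


theorem digitChar_mod_toNat (x : Nat) : ((Nat.digitChar (x % 10)).toNat : Int) = 48 + (x % 10 : Nat) := by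
  rw [digitChar_toNat (Nat.mod_lt x (by norm_num))]
  push_cast
  ring
-- ===== VERDICT (by name: the statement is the Claim_ definition above) =====
theorem generate_national_id_spec : Claim_equal_generate_national_id := by
  intro li sex c _ hpre
  unfold Spec_generate_national_id generate_national_id generate_national_id_alt
  have hm0 : 0 ≤ PySem.Int.mod c 10000000 := PySem.Int.mod_nonneg c (by norm_num)
  have hmlt : PySem.Int.mod c 10000000 < 10000000 := PySem.Int.mod_lt c (by norm_num)
  set n := (PySem.Int.mod c 10000000).toNat with hndef
  have hnlt : n < 10 ^ 7 := by omega
  have hn' : (n : Int) = c % 10000000 := by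
    rw [hndef, Int.toNat_of_nonneg hm0]
    exact PySem.Int.mod_eq_emod_of_pos (by norm_num)
  have hm10 : ∀ a : Int, PySem.Int.mod a 10 = a % 10 :=
    fun a => PySem.Int.mod_eq_emod_of_pos (by norm_num)
  have hfd10 : ∀ a : Int, PySem.Int.floordiv a 10 = a / 10 :=
    fun a => PySem.Int.floordiv_eq_ediv_of_pos (by norm_num)
  have d0 : PySem.Int.mod c 10 = ((n % 10 : Nat) : Int) := by
    simp only [hm10]
    omega
  have d1 : PySem.Int.mod (PySem.Int.floordiv c 10) 10 = ((n / 10 % 10 : Nat) : Int) := by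
    simp only [hm10, hfd10]
    omega
  have d2 : PySem.Int.mod (PySem.Int.floordiv (PySem.Int.floordiv c 10) 10) 10 = ((n / 10 / 10 % 10 : Nat) : Int) := by
    simp only [hm10, hfd10]
    omega
  have d3 : PySem.Int.mod (PySem.Int.floordiv (PySem.Int.floordiv (PySem.Int.floordiv c 10) 10) 10) 10 = ((n / 10 / 10 / 10 % 10 : Nat) : Int) := by
    simp only [hm10, hfd10]
    omega
  have d4 : PySem.Int.mod (PySem.Int.floordiv (PySem.Int.floordiv (PySem.Int.floordiv (PySem.Int.floordiv c 10) 10) 10) 10) 10 = ((n / 10 / 10 / 10 / 10 % 10 : Nat) : Int) := by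
    simp only [hm10, hfd10]
    omega
  have d5 : PySem.Int.mod (PySem.Int.floordiv (PySem.Int.floordiv (PySem.Int.floordiv (PySem.Int.floordiv (PySem.Int.floordiv c 10) 10) 10) 10) 10) 10 = ((n / 10 / 10 / 10 / 10 / 10 % 10 : Nat) : Int) := by
    simp only [hm10, hfd10]
    omega
  have d6 : PySem.Int.mod (PySem.Int.floordiv (PySem.Int.floordiv (PySem.Int.floordiv (PySem.Int.floordiv (PySem.Int.floordiv (PySem.Int.floordiv c 10) 10) 10) 10) 10) 10) 10 = ((n / 10 / 10 / 10 / 10 / 10 / 10 % 10 : Nat) : Int) := by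
    simp only [hm10, hfd10]
    omega
  have hchars : (PySem.Str.zfill (PySem.Int.toStr (PySem.Int.mod c 10000000)) 7).toList
      = bigdigits 7 n := by
    rw [PySem.Str.toList_zfill, PySem.Int.toList_toStr]
    have ht : PySem.Int.toChars (PySem.Int.mod c 10000000) = Nat.toDigits 10 n := by
      rw [PySem.Int.toChars]
      rw [if_neg (by omega)]
    rw [ht, zfill_td hnlt]
  have htoStr : ∀ e : Nat, e < 10 → (PySem.Int.toStr ((e : Nat) : Int)) = String.ofList [Nat.digitChar e] := by
    intro e he
    apply String.toList_inj.mp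
    rw [PySem.Int.toList_toStr, PySem.Int.toChars]
    rw [if_neg (by omega)]
    rw [String.toList_ofList, Int.toNat_natCast]
    exact td_lt he
  have hpiece : PySem.Str.join "" (([((n / 10 / 10 / 10 / 10 / 10 / 10 % 10 : Nat) : Int), ((n / 10 / 10 / 10 / 10 / 10 % 10 : Nat) : Int), ((n / 10 / 10 / 10 / 10 % 10 : Nat) : Int), ((n / 10 / 10 / 10 % 10 : Nat) : Int), ((n / 10 / 10 % 10 : Nat) : Int), ((n / 10 % 10 : Nat) : Int), ((n % 10 : Nat) : Int)]).map PySem.Int.toStr)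
      = PySem.Str.zfill (PySem.Int.toStr (PySem.Int.mod c 10000000)) 7 := by
    apply String.toList_inj.mp
    rw [hchars]
    simp only [List.map_cons, List.map_nil, htoStr _ (Nat.mod_lt _ (by norm_num))]
    rw [PySem.Str.join]
    rw [String.toList_ofList]
    simp [PySem.Chars.join, List.intercalate, bigdigits]
  have hsum : ((PySem.List.enumerate ([((n / 10 / 10 / 10 / 10 / 10 / 10 % 10 : Nat) : Int), ((n / 10 / 10 / 10 / 10 / 10 % 10 : Nat) : Int), ((n / 10 / 10 / 10 / 10 % 10 : Nat) : Int), ((n / 10 / 10 / 10 % 10 : Nat) : Int), ((n / 10 / 10 % 10 : Nat) : Int), ((n / 10 % 10 : Nat) : Int), ((n % 10 : Nat) : Int)]) 0).foldl (fun cs p => cs + p.2 * (7 - p.1)) (PySem.List.pyGetD LETTER_CHECKSUMS li 0 + 8 * sex)) = PySem.List.pyGetD LETTER_CHECKSUMS li 0 + 8 * sex + (((PySem.Str.zfill (PySem.Int.toStr (PySem.Int.mod c 10000000)) 7).toList.zip [7, 6, 5, 4, 3, 2, 1]).foldl (fun acc p => acc + ((p.1.toNat : Int) - 48) * p.2) 0)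 := by
    rw [hchars]
    simp only [bigdigits]
    simp only [PySem.List.enumerate_cons, PySem.List.enumerate_nil,
      List.foldl_cons, List.foldl_nil, List.zip_cons_cons, List.zip_nil_right,
      List.nil_append, List.cons_append]
    simp only [digitChar_mod_toNat]
    push_cast
    ring
  show PySem.Str.join "" [String.ofList [Char.ofNat (65 + li).toNat], PySem.Int.toStr sex,
      PySem.Str.join "" (([PySem.Int.mod (PySem.Int.floordiv (PySem.Int.floordiv (PySem.Int.floordiv (PySem.Int.floordiv (PySem.Int.floordiv (PySem.Int.floordiv c 10) 10) 10) 10) 10) 10) 10, PySem.Int.mod (PySem.Int.floordiv (PySem.Int.floordiv (PySem.Int.floordiv (PySem.Int.floordiv (PySem.Int.floordiv c 10) 10) 10) 10) 10) 10, PySem.Int.mod (PySem.Int.floordiv (PySem.Int.floordiv (PySem.Int.floordiv (PySem.Int.floordiv c 10) 10) 10) 10) 10, PySem.Int.mod (PySem.Int.floordiv (PySem.Int.floordiv (PySem.Int.floordiv c 10) 10) 10) 10, PySem.Int.mod (PySem.Int.floordiv (PySem.Int.floordiv c 10) 10) 10, PySem.Int.mod (PySem.Int.floordiv c 10) 10,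 PySem.Int.mod c 10]).map PySem.Int.toStr),
      PySem.Int.toStr (PySem.Int.mod (10 - PySem.Int.mod ((PySem.List.enumerate ([PySem.Int.mod (PySem.Int.floordiv (PySem.Int.floordiv (PySem.Int.floordiv (PySem.Int.floordiv (PySem.Int.floordiv (PySem.Int.floordiv c 10) 10) 10) 10) 10) 10) 10, PySem.Int.mod (PySem.Int.floordiv (PySem.Int.floordiv (PySem.Int.floordiv (PySem.Int.floordiv (PySem.Int.floordiv c 10) 10) 10) 10) 10) 10, PySem.Int.mod (PySem.Int.floordiv (PySem.Int.floordiv (PySem.Int.floordiv (PySem.Int.floordiv c 10) 10) 10) 10) 10, PySem.Int.mod (PySem.Int.floordiv (PySem.Int.floordiv (PySem.Int.floordiv c 10) 10) 10) 10, PySem.Int.mod (PySem.Int.floordiv (PySem.Int.floordiv c 10) 10) 10, PySem.Int.mod (PySem.Int.floordiv c 10) 10, PySem.Int.mod c 10]) 0).foldl (fun cs p => cs + p.2 * (7 - p.1)) (PySem.List.pyGetD LETTER_CHECKSUMS li 0 + 8 * sex)) 10) 10)]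
    = PySem.Str.join "" [String.ofList [Char.ofNat (65 + li).toNat], PySem.Int.toStr sex,
      PySem.Str.zfill (PySem.Int.toStr (PySem.Int.mod c 10000000)) 7,
      PySem.Int.toStr (PySem.Int.mod (10 - PySem.Int.mod (PySem.List.pyGetD LETTER_CHECKSUMS li 0 + 8 * sex + (((PySem.Str.zfill (PySem.Int.toStr (PySem.Int.mod c 10000000)) 7).toList.zip [7, 6, 5, 4, 3, 2, 1]).foldl (fun acc p => acc + ((p.1.toNat : Int) - 48) * p.2) 0)) 10) 10)]
  rw [d0, d1, d2, d3, d4, d5, d6]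
  rw [hpiece, hsum]
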